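-- pv_equiv track=rewrite | github.com/PCBZ/AlgorithmPractise | leetcode/remove_duplicates_from_sorted_array.py | removeDuplicatesII
-- ===== SOURCE A (Python) =====
-- from typing import List
--
-- def removeDuplicatesII(nums: List[int]) -> int:  # pylint: disable=invalid-name
--     """
--     Remove duplicates from sorted array allowing at most 2 duplicates.
--     Time: O(n), Space: O(1)
--     """
--     if not nums:
--         return 0
--
--     write_pos = 0
--     count = 0
--
--     for i, num in enumerate(nums):
--         if i == 0:
--             count = 1
--             write_pos = 1
--         else:
--             if num == nums[i-1]:
--                 count += 1
--             else:
--                 count = 1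
--             if count <= 2:
--                 nums[write_pos] = num
--                 write_pos += 1
--
--     return write_pos
-- ===== SOURCE B (Python) =====
-- from typing import List
--
-- def removeDuplicatesII(nums: List[int]) -> int:  # pylint: disable=invalid-name
--     """
--     Length of the array after removing duplicates beyond two: stateless count.
--     Index i is kept exactly when it does not end a run of three equal values,
--     i.e. when i < 2 or nums[i] != nums[i-1] or nums[i] != nums[i-2].
--     (Unlike the original, this does not compact nums in place; the return
--     value is identical.)
--     """
--     return sum(1 for i in range(len(nums))
--                if i < 2 or nums[i] != nums[i-1] or nums[i] != nums[i-2])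
-- ===== Notes on version B (the rewrite author's own statement) =====
-- stated objective: simpler
-- what changed: Replaces the stateful pass that maintains a run counter and a write pointer with a stateless count of the indices that do not end a run of three equal values (i < 2 or nums[i] != nums[i-1] or nums[i] != nums[i-2]); B does not perform A's in-place compaction (return value only).
import Mathlib
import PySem

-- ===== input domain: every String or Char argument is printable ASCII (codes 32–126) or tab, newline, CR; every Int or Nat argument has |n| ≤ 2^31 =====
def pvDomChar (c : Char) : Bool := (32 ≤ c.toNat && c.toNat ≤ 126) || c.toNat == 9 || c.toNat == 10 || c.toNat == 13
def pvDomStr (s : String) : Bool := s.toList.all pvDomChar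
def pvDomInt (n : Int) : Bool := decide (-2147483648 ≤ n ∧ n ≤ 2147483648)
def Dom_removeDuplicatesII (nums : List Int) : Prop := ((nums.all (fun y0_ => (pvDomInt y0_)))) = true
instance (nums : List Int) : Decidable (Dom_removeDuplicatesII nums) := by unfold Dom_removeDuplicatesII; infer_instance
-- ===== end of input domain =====

-- B replaces A's stateful run-counter/write-pointer pass by a stateless count of the
-- kept indices; return value only (B does not reproduce A's in-place compaction).

-- ===== PORT A =====
-- One loop step of A: state (write_pos, count), entry (i, num).  A's reads nums[i-1]
-- and enumerate's reads are ported on the ORIGINAL list: every write of the Python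
-- loop lands at position write_pos ≤ i with the value the original list already has
-- wherever a later read looks, so all reads see original values (exact).
def stepA (nums : List Int) (st : Int × Int) (p : Int × Int) : Int × Int :=
  if p.1 = 0 then (1, 1)
  else
    let count := if p.2 = PySem.List.pyGetD nums (p.1 - 1) 0 then st.2 + 1 else 1
    if count ≤ 2 then (st.1 + 1, count) else (st.1, count)

def removeDuplicatesII (nums : List Int) : Int :=
  if nums = [] then 0
  else ((PySem.List.enumerate nums 0).foldl (stepA nums) (0, 0)).1

-- ===== PORT B =====
-- sum(1 for i in range(len(nums)) if i < 2 or nums[i] != nums[i-1] or nums[i] != nums[i-2])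
def removeDuplicatesII_alt (nums : List Int) : Int :=
  ((PySem.List.pyRange 0 (nums.length : Int) 1).filter (fun i =>
      decide (i < 2) ||
      decide (PySem.List.pyGetD nums i 0 ≠ PySem.List.pyGetD nums (i - 1) 0) ||
      decide (PySem.List.pyGetD nums i 0 ≠ PySem.List.pyGetD nums (i - 2) 0))).length

-- ===== PRECONDITION & SPEC =====
def Spec_removeDuplicatesII (nums : List Int) (out : Int) : Prop := out = removeDuplicatesII_alt nums
instance (nums : List Int) (out : Int) : Decidable (Spec_removeDuplicatesII nums out) := by unfold Spec_removeDuplicatesII; infer_instance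

-- ===== CLAIM (what is proved, stated in full; the proofs are below) =====
def Claim_equal_removeDuplicatesII : Prop := ∀ (nums : List Int), Dom_removeDuplicatesII nums → Spec_removeDuplicatesII nums (removeDuplicatesII nums)

-- ===== LEMMAS AND PROOFS =====

-- Nat-indexed version of B's keep predicate (equal to B's Int predicate on 0 ≤ i < len).
def keepN (nums : List Int) (i : Nat) : Bool :=
  decide (i < 2) || decide (nums.getD i 0 ≠ nums.getD (i - 1) 0) ||
    decide (nums.getD i 0 ≠ nums.getD (i - 2) 0)

-- Number of kept indices among the first k.
def Bcnt (nums : List Int) (k : Nat) : Nat := ((List.range k).filter (keepN nums)).length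

lemma Bcnt_succ (nums : List Int) (k : Nat) :
    Bcnt nums (k + 1) = Bcnt nums k + (if keepN nums k then 1 else 0) := by
  simp [Bcnt, List.range_succ, List.filter_append]
  split_ifs <;> simp_all

lemma alt_eq_Bcnt (nums : List Int) :
    removeDuplicatesII_alt nums = (Bcnt nums nums.length : Int) := by
  unfold removeDuplicatesII_alt Bcnt
  rw [PySem.List.pyRange_one, List.filter_map, List.length_map]
  rw [show (((nums.length : Int)) - 0).toNat = nums.length by simp]
  norm_cast
  refine congrArg List.length (List.filter_congr ?_)
  intro k hk
  have hk' : k < nums.length := by simpa using hk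
  by_cases h2 : k < 2
  · simp [keepN, h2]
    exact Or.inl (Or.inl (by omega))
  · have e1 : ((k : Int)) - 1 = ((k - 1 : Nat) : Int) := by omega
    have e2 : ((k : Int)) - 2 = ((k - 2 : Nat) : Int) := by omega
    have h3 : ¬ k ≤ 1 := by omega
    simp [keepN, e1, e2, h3]

lemma foldl_take_enumerate (nums : List Int) :
    ∀ k : Nat, 1 ≤ k → k ≤ nums.length →
    ∃ c : Int,
      ((PySem.List.enumerate nums 0).take k).foldl (stepA nums) (0, 0)
        = ((Bcnt nums k : Int), c) ∧ 1 ≤ c ∧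
        (c = 1 ↔ (k = 1 ∨ nums.getD (k - 1) 0 ≠ nums.getD (k - 2) 0)) := by
  intro k
  induction k with
  | zero => intro h; omega
  | succ k ih =>
    intro _ hlen
    by_cases hk1 : k = 0
    · -- base case k+1 = 1
      subst hk1
      obtain ⟨x, rest, rfl⟩ : ∃ x rest, nums = x :: rest := by
        cases nums with
        | nil => simp at hlen
        | cons x rest => exact ⟨x, rest, rfl⟩
      refine ⟨1, ?_, by omega, by simp⟩
      simp [PySem.List.enumerate_cons, stepA, Bcnt, keepN, List.range_succ]
    · have hk : 1 ≤ k := by omega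
      have hklen : k ≤ nums.length := by omega
      have hklt : k < nums.length := by omega
      obtain ⟨c, heq, hc1, hciff⟩ := ih hk hklen
      have htake : (PySem.List.enumerate nums 0).take (k + 1)
          = (PySem.List.enumerate nums 0).take k ++ [((k : Int), nums[k])] := by
        rw [List.take_add_one]
        have : (PySem.List.enumerate nums 0)[k]? = some (((k : Int)), nums[k]) := by
          rw [PySem.List.getElem?_enumerate, List.getElem?_eq_getElem hklt]
          simp
        simp [this]
      rw [htake, List.foldl_append, heq]
      simp only [List.foldl_cons, List.foldl_nil]
      have hgk : nums[k] = nums.getD k 0 := by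
        rw [List.getD_eq_getElem?_getD, List.getElem?_eq_getElem hklt]; rfl
      have e1 : ((k : Int)) - 1 = ((k - 1 : Nat) : Int) := by omega
      have hknz : ((k : Int)) ≠ 0 := by exact_mod_cast hk1
      by_cases hcase : nums.getD k 0 = nums.getD (k - 1) 0
      · -- run continues: count becomes c + 1
        have hstep : stepA nums ((Bcnt nums k : Int), c) (((k : Int)), nums[k])
            = (if c + 1 ≤ 2 then ((Bcnt nums k : Int) + 1, c + 1) else ((Bcnt nums k : Int), c + 1)) := by
          simp only [stepA, if_neg hknz, e1, PySem.List.pyGetD_natCast]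
          rw [hgk, if_pos hcase]
        rw [hstep]
        have hkeep : (keepN nums k = true) ↔ c + 1 ≤ 2 := by
          constructor
          · intro hkp
            have : c = 1 := by
              rw [hciff]
              by_cases h2 : k < 2
              · left; omega
              · right
                simp only [keepN, Bool.or_eq_true, decide_eq_true_eq] at hkp
                rcases hkp with (h | h) | h
                · omega
                · exact absurd hcase h
                · intro hcc; apply h; rw [hcase, hcc]
            omega
          · intro hle
            have hc : c = 1 := by omega
            rw [hciff] at hc
            simp only [keepN, Bool.or_eq_true, decide_eq_true_eq]
            rcases hc with h | h
            · left; left; omega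
            · right; intro hcc; apply h; rw [← hcase, hcc]
        refine ⟨c + 1, ?_, by omega, ?_⟩
        · rw [Bcnt_succ]
          by_cases hkp : keepN nums k
          · rw [if_pos (hkeep.mp hkp), if_pos hkp]; push_cast; ring_nf
          · rw [if_neg (fun h => hkp (hkeep.mpr h)), if_neg hkp]; simp
        · constructor
          · intro h; omega
          · intro h
            rcases h with h | h
            · omega
            · exfalso; apply h
              simp only [Nat.add_sub_cancel]
              have : k + 1 - 2 = k - 1 := by omega
              rw [this, hcase]
      · -- new value: count resets to 1, always written
        have hstep : stepA nums ((Bcnt nums k : Int), c) (((k : Int)), nums[k])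
            = ((Bcnt nums k : Int) + 1, 1) := by
          simp only [stepA, if_neg hknz, e1, PySem.List.pyGetD_natCast]
          rw [hgk, if_neg hcase]
          norm_num
        rw [hstep]
        have hkp : keepN nums k = true := by
          simp only [keepN, Bool.or_eq_true, decide_eq_true_eq]
          by_cases h2 : k < 2
          · left; left; exact h2
          · left; right; exact hcase
        refine ⟨1, ?_, by omega, ?_⟩
        · rw [Bcnt_succ, if_pos hkp]; push_cast; ring_nf
        · constructor
          · intro _
            right
            simp only [Nat.add_sub_cancel]
            have : k + 1 - 2 = k - 1 := by omega
            rw [this]; exact hcase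
          · intro _; rfl

-- ===== VERDICT (by name: the statement is the Claim_ definition above) =====
theorem removeDuplicatesII_spec : Claim_equal_removeDuplicatesII := by
  unfold Claim_equal_removeDuplicatesII Spec_removeDuplicatesII
  intro nums _
  by_cases hnil : nums = []
  · subst hnil; simp [removeDuplicatesII, removeDuplicatesII_alt]
  · have hlen : 1 ≤ nums.length := by
      cases nums with
      | nil => exact absurd rfl hnil
      | cons x rest => simp
    obtain ⟨c, heq, -, -⟩ := foldl_take_enumerate nums nums.length hlen le_rfl
    rw [List.take_of_length_le (by simp [PySem.List.length_enumerate])] at heq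
    rw [removeDuplicatesII, if_neg hnil, heq, alt_eq_Bcnt]
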